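-- pv_equiv track=rewrite | github.com/tahtaciburak/ctwavelet | build/lib/ctwavelet/LiftingScheme.py | get_coeff_positions
-- ===== SOURCE A (Python) =====
-- import math
--
-- def get_coeff_positions(array):
--     seed = int(math.log2(len(array)))
--     cumdif = []
--     positions = []
--     for i in range(seed+1):
--         cumdif.append(i*(i-1)+(i+1))
--
--     positions.append(seed)
--     for i in range(seed):
--         positions.append(seed + cumdif[i])
--
--     return positions
-- ===== SOURCE B (Python) =====
-- import math
--
-- def get_coeff_positions(array):
--     seed = int(math.log2(len(array)))
--     positions = [seed]
--     cur = seed + 1   # running position value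
--     step = 1         # successive gaps are the odd numbers 1, 3, 5, ...
--     for _ in range(seed):
--         positions.append(cur)
--         cur += step
--         step += 2
--     return positions
-- ===== Notes on version B (the rewrite author's own statement) =====
-- stated objective: alternative
-- what changed: Replaces A's build-cumdif-table-then-index-it two-phase computation with a single running recurrence: since consecutive offsets differ by successive odd numbers, B keeps only a current value and a step accumulator and never builds a table or computes a quadratic term.
import Mathlib
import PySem

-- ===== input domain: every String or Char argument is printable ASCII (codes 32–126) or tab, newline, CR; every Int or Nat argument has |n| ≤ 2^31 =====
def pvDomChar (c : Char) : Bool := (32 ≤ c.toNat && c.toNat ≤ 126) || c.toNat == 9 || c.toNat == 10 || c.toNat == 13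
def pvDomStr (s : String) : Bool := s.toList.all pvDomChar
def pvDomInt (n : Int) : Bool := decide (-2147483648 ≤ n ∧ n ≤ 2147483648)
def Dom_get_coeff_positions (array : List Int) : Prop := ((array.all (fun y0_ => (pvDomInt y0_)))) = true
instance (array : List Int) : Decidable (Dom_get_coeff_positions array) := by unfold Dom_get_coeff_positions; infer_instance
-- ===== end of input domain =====

-- B replaces A's build-cumdif-table-then-index-it computation with a single running
-- recurrence (the gaps between consecutive positions are the odd numbers), keeping only
-- a current value and a step accumulator (objective: alternative, same cost).

-- ===== PORT A =====
-- seed = int(math.log2(len(array))): for len ≥ 1 this is floor(log2 len) = Nat.log 2 len,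
-- exact for all lengths in the domain (float log2 is correctly rounded, int() truncates).
def get_coeff_positions (array : List Int) : List Int :=
  let seedN : Nat := Nat.log 2 array.length
  let seed : Int := (seedN : Int)
  -- for i in range(seed+1): cumdif.append(i*(i-1)+(i+1))
  let cumdif : List Int :=
    (List.range (seedN + 1)).foldl
      (fun (acc : List Int) (i : Nat) => acc ++ [(i : Int) * ((i : Int) - 1) + ((i : Int) + 1)]) []
  -- positions.append(seed); for i in range(seed): positions.append(seed + cumdif[i])
  -- cumdif[i] with 0 ≤ i < seed < len cumdif is always in range; getD is exact here
  let positions : List Int :=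
    (List.range seedN).foldl (fun (acc : List Int) (i : Nat) => acc ++ [seed + cumdif.getD i 0]) [seed]
  positions

-- ===== PORT B =====
-- state (positions, cur, step); each iteration appends cur, then cur += step, step += 2
def get_coeff_positions_alt (array : List Int) : List Int :=
  let seedN : Nat := Nat.log 2 array.length
  let seed : Int := (seedN : Int)
  let st : List Int × Int × Int :=
    (List.range seedN).foldl
      (fun (s : List Int × Int × Int) (_ : Nat) =>
        (s.1 ++ [s.2.1], s.2.1 + s.2.2, s.2.2 + 2))
      ([seed], seed + 1, 1)
  st.1

-- ===== PRECONDITION & SPEC =====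
-- Pre_ excludes only the empty list, on which math.log2(0) raises ValueError in both A and B.
def Pre_get_coeff_positions (array : List Int) : Prop := array ≠ []
instance (array : List Int) : Decidable (Pre_get_coeff_positions array) := by
  unfold Pre_get_coeff_positions; infer_instance

def pvWitness_get_coeff_positions : List Int := [1, 2, 3, 4]

def Spec_get_coeff_positions (array : List Int) (out : List Int) : Prop := out = get_coeff_positions_alt array
instance (array : List Int) (out : List Int) : Decidable (Spec_get_coeff_positions array out) := by unfold Spec_get_coeff_positions; infer_instance

-- ===== CLAIM (what is proved, stated in full; the proofs are below) =====
def Claim_equal_get_coeff_positions : Prop := ∀ (array : List Int), Dom_get_coeff_positions array → Pre_get_coeff_positions array → Spec_get_coeff_positions array (get_coeff_positions array)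

-- ===== LEMMAS AND PROOFS =====

-- appending one element per index of range n builds a map
theorem foldl_range_append (f : Nat → Int) (n : Nat) (acc : List Int) :
    (List.range n).foldl (fun a i => a ++ [f i]) acc = acc ++ (List.range n).map f := by
  induction n generalizing acc with
  | zero => simp
  | succ m ih => simp [List.range_succ, ih]

theorem range_map_getD (f : Nat → Int) (n i : Nat) (h : i < n) :
    ((List.range n).map f).getD i 0 = f i := by
  simp [List.getD_eq_getElem?_getD, h]

-- A's whole computation, for generic seed n, in closed form
theorem core (n : Nat) :
    (List.range n).foldl
        (fun (acc : List Int) (i : Nat) => acc ++ [(n : Int) +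
          ((List.range (n + 1)).foldl
              (fun (acc : List Int) (j : Nat) => acc ++ [(j : Int) * ((j : Int) - 1) + ((j : Int) + 1)]) []).getD i 0])
        [(n : Int)]
      = (n : Int) :: (List.range n).map (fun (i : Nat) => (n : Int) + (i : Int) * (i : Int) + 1) := by
  rw [foldl_range_append (fun j => (j : Int) * ((j : Int) - 1) + ((j : Int) + 1)) (n + 1) []]
  rw [List.nil_append]
  rw [foldl_range_append
        (fun (i : Nat) => (n : Int) +
          ((List.range (n + 1)).map (fun (j : Nat) => (j : Int) * ((j : Int) - 1) + ((j : Int) + 1))).getD i 0)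
        n [(n : Int)]]
  rw [List.singleton_append]
  refine congrArg (List.cons _) ?_
  apply List.map_congr_left
  intro i hi
  rw [range_map_getD (fun j => (j : Int) * ((j : Int) - 1) + ((j : Int) + 1)) (n + 1) i
        (by have := List.mem_range.mp hi; omega)]
  ring

-- a foldl whose step ignores the element is an iterate of the step
theorem foldl_const {α β : Type} (g : α → α) (l : List β) (init : α) :
    l.foldl (fun s _ => g s) init = g^[l.length] init := by
  induction l generalizing init with
  | nil => rfl
  | cons x xs ih => simp [List.foldl_cons, ih, Function.iterate_succ_apply]

-- invariant of B's recurrence: starting at value seed + k² + 1 with step 2k + 1,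
-- n iterations append the closed-form positions for indices k, k+1, …, k+n-1
theorem iter_inv (seed : Int) (n : Nat) : ∀ (k : Nat) (acc : List Int),
    ((fun (s : List Int × Int × Int) => (s.1 ++ [s.2.1], s.2.1 + s.2.2, s.2.2 + 2))^[n]
        (acc, seed + (k : Int) * (k : Int) + 1, 2 * (k : Int) + 1)).1
      = acc ++ (List.range n).map (fun (i : Nat) => seed + ((k + i : Nat) : Int) * ((k + i : Nat) : Int) + 1) := by
  induction n with
  | zero => intro k acc; simp
  | succ m ih =>
    intro k acc
    rw [Function.iterate_succ_apply]
    dsimp only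
    have e2 : seed + (k : Int) * (k : Int) + 1 + (2 * (k : Int) + 1)
        = seed + ((k + 1 : Nat) : Int) * ((k + 1 : Nat) : Int) + 1 := by push_cast; ring
    have e3 : 2 * (k : Int) + 1 + 2 = 2 * ((k + 1 : Nat) : Int) + 1 := by push_cast; ring
    rw [e2, e3, ih (k + 1) (acc ++ [seed + (k : Int) * (k : Int) + 1])]
    rw [List.range_succ_eq_map, List.map_cons, List.map_map]
    simp only [List.append_assoc, List.singleton_append]
    refine congrArg (acc ++ ·) (congrArg₂ List.cons (by push_cast; ring) ?_)
    refine List.map_congr_left (fun i _ => ?_)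
    have : k + 1 + i = k + Nat.succ i := by omega
    simp [Function.comp, this]

-- ===== VERDICT (by name: the statement is the Claim_ definition above) =====
theorem get_coeff_positions_spec : Claim_equal_get_coeff_positions := by
  intro array _ _
  show get_coeff_positions array = get_coeff_positions_alt array
  unfold get_coeff_positions get_coeff_positions_alt
  dsimp only
  rw [core (Nat.log 2 array.length)]
  rw [foldl_const (fun (s : List Int × Int × Int) => (s.1 ++ [s.2.1], s.2.1 + s.2.2, s.2.2 + 2))]
  rw [List.length_range]
  have h0 : ([((Nat.log 2 array.length : Nat) : Int)],
        ((Nat.log 2 array.length : Nat) : Int) + 1, (1 : Int))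
      = ([((Nat.log 2 array.length : Nat) : Int)],
        ((Nat.log 2 array.length : Nat) : Int) + ((0 : Nat) : Int) * ((0 : Nat) : Int) + 1,
        2 * ((0 : Nat) : Int) + 1) := by norm_num
  rw [h0, iter_inv ((Nat.log 2 array.length : Nat) : Int) (Nat.log 2 array.length) 0
        [((Nat.log 2 array.length : Nat) : Int)]]
  simp
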